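-- pv_equiv track=rewrite | github.com/tmk-07/os-calculator | churromain.py | add_primes
-- ===== SOURCE A (Python) =====
-- from itertools import permutations, combinations_with_replacement, combinations, product  # Add combinations
--
-- def add_primes(tokens, num_primes): # adds primes in all valid positions
--     if num_primes == 0:
--         return {tuple(tokens)}
--     # Candidates are indexes where we can append primes: operands or closing parentheses
--     candidate_indices = [i for i, t in enumerate(tokens) if (t.isalpha() or t == ')')]
--     variants = set()
--
--     # combinations_with_replacement: primes can stack on same token (e.g., R'')
--     for indices_combo in combinations_with_replacement(candidate_indices, num_primes):
--         new_tokens = tokens.copy()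
--
--         # To avoid index shift while modifying, count how many primes to add per token
--         prime_counts = {}
--         for idx in indices_combo:
--             prime_counts[idx] = prime_counts.get(idx, 0) + 1
--
--         # Insert primes behind tokens, starting from highest index to avoid shifting
--         for idx in sorted(prime_counts.keys(), reverse=True):
--             new_tokens[idx] = new_tokens[idx] + ("'" * prime_counts[idx])
--
--         variants.add(tuple(new_tokens))
--
--     return variants
-- ===== SOURCE B (Python) =====
-- def add_primes(tokens, num_primes):  # adds primes in all valid positions
--     if num_primes == 0:
--         return {tuple(tokens)}
--     candidate_indices = [i for i, t in enumerate(tokens) if (t.isalpha() or t == ')')]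
--
--     # Enumerate count-vectors over the candidate positions summing to num_primes,
--     # choosing at each position how many primes it receives (from all down to none).
--     def distributions(pos, remaining):
--         if pos == len(candidate_indices):
--             return [[]] if remaining == 0 else []
--         out = []
--         for c in range(remaining, -1, -1):
--             for rest in distributions(pos + 1, remaining - c):
--                 out.append([c] + rest)
--         return out
--
--     variants = set()
--     for counts in distributions(0, num_primes):
--         new_tokens = list(tokens)
--         for idx, c in zip(candidate_indices, counts):
--             new_tokens[idx] = new_tokens[idx] + "'" * c
--         variants.add(tuple(new_tokens))
--     return variants
-- ===== Notes on version B (the rewrite author's own statement) =====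
-- stated objective: alternative
-- what changed: Replaces itertools.combinations_with_replacement plus per-combo dict grouping and reverse-sorted in-place updates by a direct recursive enumeration of count-vectors (how many primes each candidate position receives), applied in one zip pass without mutating the input.
import Mathlib
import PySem

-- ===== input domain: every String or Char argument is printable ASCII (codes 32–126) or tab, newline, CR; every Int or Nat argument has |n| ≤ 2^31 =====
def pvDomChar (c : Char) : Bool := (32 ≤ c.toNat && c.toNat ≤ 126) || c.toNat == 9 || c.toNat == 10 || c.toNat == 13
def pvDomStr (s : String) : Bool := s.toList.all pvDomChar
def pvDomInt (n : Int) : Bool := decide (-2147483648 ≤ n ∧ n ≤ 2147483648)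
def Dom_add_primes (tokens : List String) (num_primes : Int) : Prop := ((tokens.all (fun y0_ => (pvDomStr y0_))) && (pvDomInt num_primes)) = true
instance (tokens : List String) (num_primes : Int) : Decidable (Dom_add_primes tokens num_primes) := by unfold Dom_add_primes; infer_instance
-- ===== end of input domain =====

-- B enumerates prime-count vectors over the candidate positions directly (recursive stars-and-bars)
-- instead of A's combinations_with_replacement + dict grouping + reverse-sorted updates; alternative, not faster.
-- A copies `tokens` before mutating (`tokens.copy()`), so neither program mutates its argument.

-- ===== PORT A =====
-- shared helper: Python's  t + "'" * c  (str*int clamps c ≤ 0 to the empty string, exactly as list*int / pyRepeat)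
def appendPrimes (t : String) (c : Int) : String :=
  String.ofList (t.toList ++ PySem.List.pyRepeat ['\''] c)

-- itertools.combinations_with_replacement(xs, r) (not in PySem), hand-ported in CPython's lexicographic order
def cwr {α : Type} (xs : List α) (r : Nat) : List (List α) :=
  match r, xs with
  | 0, _ => [[]]
  | _ + 1, [] => []
  | r + 1, x :: rest => ((cwr (x :: rest) r).map (x :: ·)) ++ cwr rest (r + 1)
termination_by (r, xs.length)

def add_primes (tokens : List String) (num_primes : Int) : List (List String) :=
  if num_primes == 0 then PySem.Set.add PySem.Set.empty tokens
  else
    let candidate_indices := ((PySem.List.enumerate tokens).filter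
        (fun p => PySem.Str.strIsalpha p.2 || p.2 == ")")).map (·.1)
    (cwr candidate_indices num_primes.toNat).foldl
      (fun variants indices_combo =>
        let prime_counts : PySem.Dict Int Int :=
          indices_combo.foldl (fun (d : PySem.Dict Int Int) idx => d.insert idx (d.getD idx 0 + 1)) PySem.Dict.empty
        PySem.Set.add variants
          ((PySem.List.sorted prime_counts.keys (fun x => x) true).foldl
            (fun new_tokens idx =>
              PySem.List.pySetD new_tokens idx
                (appendPrimes (PySem.List.pyGetD new_tokens idx "") (prime_counts.getD idx 0)))
            tokens))
      PySem.Set.empty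

-- ===== PORT B =====
def distributions (cands : List Int) (remaining : Int) : List (List Int) :=
  match cands with
  | [] => if remaining == 0 then [[]] else []
  | _ :: rest =>
      (PySem.List.pyRange remaining (-1) (-1)).foldl
        (fun out c => out ++ (distributions rest (remaining - c)).map (c :: ·)) []

def add_primes_alt (tokens : List String) (num_primes : Int) : List (List String) :=
  if num_primes == 0 then PySem.Set.add PySem.Set.empty tokens
  else
    let candidate_indices := ((PySem.List.enumerate tokens).filter
        (fun p => PySem.Str.strIsalpha p.2 || p.2 == ")")).map (·.1)
    (distributions candidate_indices num_primes).foldl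
      (fun variants counts =>
        PySem.Set.add variants
          ((candidate_indices.zip counts).foldl
            (fun new_tokens ic =>
              PySem.List.pySetD new_tokens ic.1
                (appendPrimes (PySem.List.pyGetD new_tokens ic.1 "") ic.2))
            tokens))
      PySem.Set.empty

-- ===== PRECONDITION & SPEC =====
-- Pre_ excludes num_primes < 0, where A raises ValueError (combinations_with_replacement with negative r).
def Pre_add_primes (tokens : List String) (num_primes : Int) : Prop := 0 ≤ num_primes
instance (tokens : List String) (num_primes : Int) : Decidable (Pre_add_primes tokens num_primes) := by
  unfold Pre_add_primes; infer_instance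
def pvWitness_add_primes : List String × Int := (["R", ")", "+"], 2)

def Spec_add_primes (tokens : List String) (num_primes : Int) (out : List (List String)) : Prop :=
  out = add_primes_alt tokens num_primes
instance (tokens : List String) (num_primes : Int) (out : List (List String)) :
    Decidable (Spec_add_primes tokens num_primes out) := by unfold Spec_add_primes; infer_instance

-- ===== CLAIM (what is proved, stated in full; the proofs are below) =====
def Claim_equal_add_primes : Prop := ∀ (tokens : List String) (num_primes : Int),
  Dom_add_primes tokens num_primes → Pre_add_primes tokens num_primes →
  Spec_add_primes tokens num_primes (add_primes tokens num_primes)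

-- ===== LEMMAS AND PROOFS =====

-- the update one token position receives: ts[i] += "'" * c
def upd (ts : List String) (ic : Int × Int) : List String :=
  PySem.List.pySetD ts ic.1 (appendPrimes (PySem.List.pyGetD ts ic.1 "") ic.2)

-- canonical form of one variant: fold the distinct indices (first-occurrence order) with their multiplicities
def canon (combo : List Int) (ts : List String) : List String :=
  (PySem.Set.ofList combo).foldl (fun ts j => upd ts (j, (combo.count j : Int))) ts

theorem appendPrimes_zero (t : String) : appendPrimes t 0 = t := by
  simp [appendPrimes, PySem.List.pyRepeat_singleton, String.ofList_toList]

theorem upd_zero (ts : List String) (i : Int) (h : 0 ≤ i) : upd ts (i, 0) = ts := by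
  rw [upd]
  simp only [appendPrimes_zero]
  rw [PySem.List.pySetD_of_nonneg _ _ h]
  simp only [PySem.List.pyGetD, PySem.List.pyGet?_of_nonneg _ h]
  rcases Nat.lt_or_ge i.toNat ts.length with hl | hl
  · simp [List.getElem?_eq_getElem hl, List.set_getElem_self]
  · simp [List.getElem?_eq_none hl, List.set_eq_of_length_le hl]

theorem upd_comm (p q : Int × Int) (hp : 0 ≤ p.1) (hq : 0 ≤ q.1) (hne : p.1 ≠ q.1) (ts : List String) :
    upd (upd ts p) q = upd (upd ts q) p := by
  have hij : p.1.toNat ≠ q.1.toNat := by omega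
  simp only [upd, PySem.List.pySetD_of_nonneg _ _ hp, PySem.List.pySetD_of_nonneg _ _ hq,
    PySem.List.pyGetD, PySem.List.pyGet?_of_nonneg _ hp, PySem.List.pyGet?_of_nonneg _ hq]
  rw [List.getElem?_set_ne hij, List.getElem?_set_ne (Ne.symm hij), List.set_comm _ _ hij]

-- folding upd over any permutation of a list of pairs with distinct nonnegative indices gives the same list
theorem foldl_upd_perm (ps qs : List (Int × Int)) (hperm : ps.Perm qs)
    (hnd : (ps.map (·.1)).Nodup) (hnn : ∀ p ∈ ps, 0 ≤ p.1) (ts : List String) :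
    ps.foldl upd ts = qs.foldl upd ts := by
  refine hperm.foldl_eq' ?_ ts
  intro p hp q hq ts'
  by_cases hpq : p = q
  · subst hpq; rfl
  · have h1 : p.1 ≠ q.1 := fun h => hpq (List.inj_on_of_nodup_map hnd hp hq h)
    exact upd_comm p q (hnn p hp) (hnn q hq) h1 ts'

theorem cwr_mem_mem {α : Type} (xs : List α) (r : Nat) :
    ∀ c ∈ cwr xs r, ∀ j ∈ c, j ∈ xs := by
  induction xs, r using cwr.induct with
  | case1 xs => intro c hc; simp [cwr] at hc; simp [hc]
  | case2 r => intro c hc; simp [cwr] at hc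
  | case3 r x rest ih1 ih2 =>
    intro c hc j hj
    simp only [cwr] at hc
    rcases List.mem_append.1 hc with hc | hc
    · obtain ⟨c', hc', rfl⟩ := List.mem_map.1 hc
      rcases List.mem_cons.1 hj with rfl | hj'
      · exact List.mem_cons_self
      · exact ih1 c' hc' j hj'
    · exact List.mem_cons_of_mem _ (ih2 c hc j hj)

theorem cwr_unroll {α : Type} (x : α) (rest : List α) (k : Nat) :
    cwr (x :: rest) k =
      ((List.range (k + 1)).map (fun j => k - j)).flatMap
        (fun c => (cwr rest (k - c)).map (fun l => List.replicate c x ++ l)) := by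
  induction k with
  | zero => simp [cwr]
  | succ k ih =>
    simp only [cwr]
    rw [ih]
    have hshift :
        (((List.range (k + 1)).map (fun j => k - j)).flatMap
            (fun c => (cwr rest (k - c)).map (fun l => List.replicate c x ++ l))).map (x :: ·)
          = ((List.range (k + 1)).map (fun j => k + 1 - j)).flatMap
            (fun c => (cwr rest (k + 1 - c)).map (fun l => List.replicate c x ++ l)) := by
      rw [List.map_flatMap, List.flatMap_map, List.flatMap_map]
      rw [List.flatMap_def, List.flatMap_def]
      apply congrArg
      apply List.map_congr_left
      intro j hj
      have hjk : j < k + 1 := List.mem_range.1 hj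
      have e1 : k - (k - j) = j := by omega
      have e3 : k + 1 - j = (k - j) + 1 := by omega
      have e2 : k + 1 - (k - j + 1) = j := by omega
      simp only [e1, e3, e2, List.map_map]
      apply List.map_congr_left
      intro l _
      simp [Function.comp, List.replicate_succ]
    rw [hshift]
    have hsplit : (List.range (k + 1 + 1)).map (fun j => k + 1 - j)
        = (List.range (k + 1)).map (fun j => k + 1 - j) ++ [0] := by
      rw [List.range_succ, List.map_append]
      simp
    rw [hsplit, List.flatMap_append]
    simp

-- the grouping dict A builds from a combo: keys are the distinct indices, values the multiplicities
theorem pc_keys (combo : List Int) :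
    (combo.foldl (fun (d : PySem.Dict Int Int) idx => d.insert idx (d.getD idx 0 + 1)) PySem.Dict.empty).keys
      = PySem.Set.ofList combo := by
  rw [PySem.Dict.keys_foldl_insert]
  simp [PySem.Dict.keys_empty, PySem.Set.update_nil_left]

theorem pc_getD (combo : List Int) (v : Int) :
    (combo.foldl (fun (d : PySem.Dict Int Int) idx => d.insert idx (d.getD idx 0 + 1)) PySem.Dict.empty).getD v 0
      = (combo.count v : Int) := by
  rw [PySem.Dict.getD_foldl_insert_add_one]
  simp [PySem.Dict.getD_empty]

-- A's per-combo body (reverse-sorted distinct keys, dict multiplicities) is `canon`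
theorem bodyA_eq_canon (tokens : List String) (combo : List Int) (hnn : ∀ j ∈ combo, 0 ≤ j) :
    (PySem.List.sorted
        (combo.foldl (fun (d : PySem.Dict Int Int) idx => d.insert idx (d.getD idx 0 + 1)) PySem.Dict.empty).keys
        (fun x => x) true).foldl
      (fun new_tokens idx =>
        PySem.List.pySetD new_tokens idx
          (appendPrimes (PySem.List.pyGetD new_tokens idx "")
            ((combo.foldl (fun (d : PySem.Dict Int Int) idx => d.insert idx (d.getD idx 0 + 1)) PySem.Dict.empty).getD idx 0)))
      tokens
    = canon combo tokens := by
  rw [pc_keys]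
  have hbody :
      (PySem.List.sorted (PySem.Set.ofList combo) (fun x => x) true).foldl
        (fun new_tokens idx =>
          PySem.List.pySetD new_tokens idx
            (appendPrimes (PySem.List.pyGetD new_tokens idx "")
              ((combo.foldl (fun (d : PySem.Dict Int Int) idx => d.insert idx (d.getD idx 0 + 1)) PySem.Dict.empty).getD idx 0)))
        tokens
      = ((PySem.List.sorted (PySem.Set.ofList combo) (fun x => x) true).map
          (fun j => (j, (combo.count j : Int)))).foldl upd tokens := by
    rw [List.foldl_map]
    apply PySem.List.foldl_congr_mem
    intro a y _
    rw [upd, pc_getD]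
  rw [hbody]
  have hperm : ((PySem.List.sorted (PySem.Set.ofList combo) (fun x => x) true).map
        (fun j => (j, (combo.count j : Int)))).Perm
      ((PySem.Set.ofList combo).map (fun j => (j, (combo.count j : Int)))) :=
    (PySem.List.sorted_perm (PySem.Set.ofList combo) (fun x => x) true).map _
  have hnd : (((PySem.List.sorted (PySem.Set.ofList combo) (fun x => x) true).map
        (fun j => (j, (combo.count j : Int)))).map (·.1)).Nodup := by
    rw [List.map_map]
    have hid : ((fun (p : Int × Int) => p.1) ∘ (fun j => (j, (combo.count j : Int)))) = fun j => j := rfl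
    rw [hid, List.map_id']
    exact (PySem.List.sorted_perm (PySem.Set.ofList combo) (fun x => x) true).nodup_iff.mpr
      (PySem.Set.nodup_ofList combo)
  have hnn' : ∀ p ∈ ((PySem.List.sorted (PySem.Set.ofList combo) (fun x => x) true).map
        (fun j => (j, (combo.count j : Int)))), 0 ≤ p.1 := by
    intro p hp
    obtain ⟨j, hj, rfl⟩ := List.mem_map.1 hp
    have hj2 : j ∈ PySem.Set.ofList combo := (PySem.List.mem_sorted _ _ _ _).1 hj
    exact hnn j ((PySem.Set.mem_ofList _ _).1 hj2)
  rw [foldl_upd_perm _ _ hperm hnd hnn' tokens]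
  rw [canon, List.foldl_map]

theorem ofList_replicate_succ (x : Int) (c : Nat) :
    PySem.Set.ofList (List.replicate (c + 1) x) = [x] := by
  induction c with
  | zero => rfl
  | succ c ih =>
    rw [List.replicate_succ, PySem.Set.ofList_cons, ih]
    have hd : PySem.Set.discard [x] x = [] := by
      rw [List.eq_nil_iff_forall_not_mem]
      intro a ha
      have := (PySem.Set.mem_discard [x] x a).1 ha
      rcases this with ⟨h1, h2⟩
      exact h2 (List.mem_singleton.1 h1)
    rw [hd]

theorem ofList_replicate_append (x : Int) (c : Nat) (combo : List Int) (hx : x ∉ combo) :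
    PySem.Set.ofList (List.replicate (c + 1) x ++ combo) = x :: PySem.Set.ofList combo := by
  rw [PySem.Set.ofList_append, ofList_replicate_succ, PySem.Set.update_eq_append_filter]
  have hf : (PySem.Set.ofList combo).filter (fun y => !(PySem.Set.contains [x] y))
      = PySem.Set.ofList combo := by
    apply List.filter_eq_self.2
    intro y hy
    have hyc : y ∈ combo := (PySem.Set.mem_ofList _ _).1 hy
    have hne : y ≠ x := fun h => hx (h ▸ hyc)
    simp [PySem.Set.contains, hne]
  rw [hf]
  rfl

theorem canon_rep_append (x : Int) (combo : List Int) (c : Nat) (ts : List String)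
    (hx : ∀ j ∈ combo, x < j) (hxnn : 0 ≤ x) :
    canon (List.replicate c x ++ combo) ts = canon combo (upd ts (x, (c : Int))) := by
  have hxmem : x ∉ combo := fun h => lt_irrefl x (hx x h)
  cases c with
  | zero =>
    have h0 : upd ts (x, ((0 : Nat) : Int)) = ts := by
      rw [Nat.cast_zero]
      exact upd_zero ts x hxnn
    rw [h0]
    simp only [List.replicate_zero, List.nil_append]
  | succ c =>
    rw [canon, canon, ofList_replicate_append x c combo hxmem, List.foldl_cons]
    have hcx : (List.replicate (c + 1) x ++ combo).count x = c + 1 := by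
      simp [List.count_append, List.count_eq_zero_of_not_mem hxmem]
    rw [hcx]
    apply PySem.List.foldl_congr_mem
    intro a j hj
    have hjc : j ∈ combo := (PySem.Set.mem_ofList _ _).1 hj
    have hjx : j ≠ x := fun h => hxmem (h ▸ hjc)
    have hcnt : (List.replicate (c + 1) x ++ combo).count j = combo.count j := by
      simp [List.count_append, List.count_replicate, Ne.symm hjx]
    rw [hcnt]

theorem distributions_cons (x : Int) (rest : List Int) (k : Nat) :
    distributions (x :: rest) (k : Int) =
      ((List.range (k + 1)).map (fun j => k - j)).flatMap
        (fun (c : Nat) => (distributions rest ((k : Int) - (c : Int))).map ((c : Int) :: ·)) := by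
  rw [distributions, PySem.List.foldl_append_eq_flatMap]
  have hrange : PySem.List.pyRange (k : Int) (-1) (-1)
      = ((List.range (k + 1)).map (fun j => (k - j : Nat))).map (fun c => ((c : Nat) : Int)) := by
    rw [PySem.List.pyRange_neg_one]
    have hlen : ((k : Int) - (-1)).toNat = k + 1 := by omega
    rw [hlen, List.map_map]
    apply List.map_congr_left
    intro j hj
    have : j < k + 1 := List.mem_range.1 hj
    simp only [Function.comp]
    omega
  rw [hrange, List.flatMap_map]
  simp only [List.nil_append]

-- main induction: A's combos and B's count-vectors generate the same variant lists, in the same order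
theorem main_lemma (cands : List Int) (hs : cands.Pairwise (· < ·)) (hnn : ∀ i ∈ cands, 0 ≤ i) :
    ∀ (k : Nat) (ts : List String),
      (cwr cands k).map (fun combo => canon combo ts)
        = (distributions cands (k : Int)).map (fun counts => (cands.zip counts).foldl upd ts) := by
  induction cands with
  | nil =>
    intro k ts
    cases k with
    | zero => simp [cwr, distributions, canon]
    | succ k =>
      have hne : ¬(((k + 1 : Nat) : Int) == 0) = true := by
        simp only [beq_iff_eq]
        push_cast
        omega
      simp only [distributions, cwr]
      rw [if_neg hne]
      simp
  | cons x rest ih =>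
    intro k ts
    have hs' : rest.Pairwise (· < ·) := hs.tail
    have hxlt : ∀ j ∈ rest, x < j := fun j hj => (List.pairwise_cons.1 hs).1 j hj
    have hnn' : ∀ i ∈ rest, 0 ≤ i := fun i hi => hnn i (List.mem_cons_of_mem _ hi)
    have hxnn : 0 ≤ x := hnn x List.mem_cons_self
    have ihr := ih hs' hnn'
    rw [cwr_unroll, distributions_cons, List.map_flatMap, List.map_flatMap]
    rw [List.flatMap_def, List.flatMap_def]
    apply congrArg
    apply List.map_congr_left
    intro c hc
    have hck : c ≤ k := by
      obtain ⟨j, hj, rfl⟩ := List.mem_map.1 hc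
      have := List.mem_range.1 hj
      omega
    rw [List.map_map, List.map_map]
    have hleft : (cwr rest (k - c)).map
          ((fun combo => canon combo ts) ∘ fun l => List.replicate c x ++ l)
        = (cwr rest (k - c)).map (fun combo => canon combo (upd ts (x, (c : Int)))) := by
      apply List.map_congr_left
      intro combo hcombo
      have hsub : ∀ j ∈ combo, j ∈ rest := cwr_mem_mem rest (k - c) combo hcombo
      exact canon_rep_append x combo c ts (fun j hj => hxlt j (hsub j hj)) hxnn
    rw [hleft, ihr (k - c)]
    have hkc : (k : Int) - (c : Int) = ((k - c : Nat) : Int) := by omega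
    rw [hkc]
    apply List.map_congr_left
    intro counts _
    rfl

theorem foldl_add_of_map_eq {α β : Type} (f : α → List String) (g : β → List String) :
    ∀ (xs : List α) (ys : List β), xs.map f = ys.map g →
      ∀ (s : PySem.Set (List String)),
        xs.foldl (fun v a => PySem.Set.add v (f a)) s = ys.foldl (fun v b => PySem.Set.add v (g b)) s := by
  intro xs
  induction xs with
  | nil =>
    intro ys h s
    cases ys with
    | nil => rfl
    | cons b ys => simp at h
  | cons a xs ihx =>
    intro ys h s
    cases ys with
    | nil => simp at h
    | cons b ys =>
      simp only [List.map_cons, List.cons.injEq] at h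
      rw [List.foldl_cons, List.foldl_cons, h.1, ihx ys h.2]

-- properties of the candidate index list
theorem cands_sorted (tokens : List String) :
    (((PySem.List.enumerate tokens).filter
        (fun p => PySem.Str.strIsalpha p.2 || p.2 == ")")).map (·.1)).Pairwise (· < ·) := by
  exact List.Pairwise.map _ (fun a b h => h)
    ((PySem.List.pairwise_lt_enumerate tokens 0).filter _)

theorem cands_nonneg (tokens : List String) :
    ∀ i ∈ ((PySem.List.enumerate tokens).filter
        (fun p => PySem.Str.strIsalpha p.2 || p.2 == ")")).map (·.1), 0 ≤ i := by
  intro i hi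
  obtain ⟨p, hp, rfl⟩ := List.mem_map.1 hi
  have hpe : p ∈ PySem.List.enumerate tokens 0 := List.mem_of_mem_filter hp
  obtain ⟨kk, hk, rfl⟩ := (PySem.List.mem_enumerate_iff _ _ _).1 hpe
  simp

-- ===== VERDICT (by name: the statement is the Claim_ definition above) =====
theorem add_primes_spec : Claim_equal_add_primes := by
  intro tokens num_primes _hdom hpre
  unfold Spec_add_primes
  by_cases h0 : num_primes = 0
  · simp [add_primes, add_primes_alt, h0]
  · have hbeq : (num_primes == 0) = false := beq_eq_false_iff_ne.mpr h0
    have hk : num_primes = (num_primes.toNat : Int) := (Int.toNat_of_nonneg hpre).symm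
    simp only [add_primes, add_primes_alt, hbeq, Bool.false_eq_true, if_false]
    apply foldl_add_of_map_eq
    have hupd : (fun (new_tokens : List String) (ic : Int × Int) =>
        PySem.List.pySetD new_tokens ic.1
          (appendPrimes (PySem.List.pyGetD new_tokens ic.1 "") ic.2)) = upd := rfl
    have h1 := main_lemma
      (((PySem.List.enumerate tokens).filter
          (fun p => PySem.Str.strIsalpha p.2 || p.2 == ")")).map (·.1))
      (cands_sorted tokens) (cands_nonneg tokens) num_primes.toNat tokens
    rw [← hk] at h1
    rw [hupd, ← h1]
    apply List.map_congr_left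
    intro combo hcombo
    have hnnc : ∀ j ∈ combo, 0 ≤ j := fun j hj =>
      cands_nonneg tokens j
        (cwr_mem_mem _ num_primes.toNat combo hcombo j hj)
    exact bodyA_eq_canon tokens combo hnnc
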